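-- pv_equiv track=rewrite | github.com/camiiutd/algo1_2k24_1C | 2cuatri/python/parciales/dalequeseaprueba/funcionesfundamentales.py | subsecuencia_mas_larga
-- ===== SOURCE A (Python) =====
-- def subsecuencia_mas_larga(tipos_pacientes_atendidos: list[int]) -> int:
--     res:int = 0
--     largo_max:int = 0
--     largo_actual:int = 0
--     indice:int = 0
--     for t in tipos_pacientes_atendidos:
--
--         if t == "perro" or t == "gato":
--             largo_actual +=1
--         else:
--             if largo_max < largo_actual:
--                 res = indice - largo_actual
--                 largo_max = largo_actual
--             largo_actual = 0
--         indice +=1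
--
--     if largo_max < largo_actual:
--         res = indice - largo_actual
--
--     return res
-- ===== SOURCE B (Python) =====
-- def subsecuencia_mas_larga(tipos_pacientes_atendidos):
--     xs = tipos_pacientes_atendidos
--     n = len(xs)
--     # phase 1: extract the maximal qualifying runs as (start, length) pairs
--     runs = []
--     i = 0
--     while i < n:
--         if xs[i] in ("perro", "gato"):
--             j = i + 1
--             while j < n and xs[j] in ("perro", "gato"):
--                 j += 1
--             runs.append((i, j - i))
--             i = j
--         else:
--             i += 1
--     # phase 2: earliest strictly-longest run; default start 0
--     best = (0, 0)
--     for run in runs: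
--         if best[1] < run[1]:
--             best = run
--     return best[0]
-- ===== Notes on version B (the rewrite author's own statement) =====
-- stated objective: alternative
-- what changed: B first extracts the maximal perro/gato runs as (start, length) pairs with a two-pointer scan and then selects the earliest strictly-longest run in a separate pass, instead of A's single fused scan with inline maximum tracking.
import Mathlib
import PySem

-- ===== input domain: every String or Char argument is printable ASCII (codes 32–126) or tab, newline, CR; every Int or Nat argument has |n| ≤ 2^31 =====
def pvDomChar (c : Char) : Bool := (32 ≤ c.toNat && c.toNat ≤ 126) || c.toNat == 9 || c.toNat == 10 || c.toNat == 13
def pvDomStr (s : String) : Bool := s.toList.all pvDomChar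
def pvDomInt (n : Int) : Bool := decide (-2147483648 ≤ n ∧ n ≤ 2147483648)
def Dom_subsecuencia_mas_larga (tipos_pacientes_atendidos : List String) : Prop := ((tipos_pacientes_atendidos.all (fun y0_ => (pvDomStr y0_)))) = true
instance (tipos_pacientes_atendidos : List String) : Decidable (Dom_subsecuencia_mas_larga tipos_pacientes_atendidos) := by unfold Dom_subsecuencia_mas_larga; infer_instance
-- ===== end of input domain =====

-- B is an 'alternative' decomposition of the same O(n) task: it first extracts the maximal
-- qualifying runs as (start, length) pairs, then picks the earliest strictly-longest run,
-- instead of A's single fused scan with inline maximum tracking. Return value only; no mutation.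

-- ===== PORT A =====
-- the for-loop of A as structural recursion over the same four state variables;
-- the base case is the trailing `if largo_max < largo_actual` + return
def pvAGo : List String → Int → Int → Int → Int → Int
  | [], res, lmax, lcur, idx => if lmax < lcur then idx - lcur else res
  | t :: ts, res, lmax, lcur, idx =>
    if t == "perro" || t == "gato" then
      pvAGo ts res lmax (lcur + 1) (idx + 1)
    else if lmax < lcur then
      pvAGo ts (idx - lcur) lcur 0 (idx + 1)
    else
      pvAGo ts res lmax 0 (idx + 1)

def subsecuencia_mas_larga (tipos_pacientes_atendidos : List String) : Int :=
  pvAGo tipos_pacientes_atendidos 0 0 0 0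

-- ===== PORT B =====
def pvQ (t : String) : Bool := t == "perro" || t == "gato"

-- phase 1 of Source B: the outer while-loop; the inner while that advances j is the
-- takeWhile-length of the rest, and `i = j` is the corresponding drop
def pvRuns : List String → Int → List (Int × Int)
  | [], _ => []
  | t :: ts, i =>
    if pvQ t then
      let k : Nat := (ts.takeWhile pvQ).length
      (i, (1 : Int) + k) :: pvRuns (ts.drop k) (i + 1 + k)
    else
      pvRuns ts (i + 1)
termination_by xs _ => xs.length
decreasing_by
  · simp [Nat.lt_succ_of_le (Nat.sub_le _ _)]
  · simp

-- phase 2 of Source B: the best-run fold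
def pvBest (runs : List (Int × Int)) : Int × Int :=
  runs.foldl (fun b r => if b.2 < r.2 then r else b) (0, 0)

def subsecuencia_mas_larga_alt (tipos_pacientes_atendidos : List String) : Int :=
  (pvBest (pvRuns tipos_pacientes_atendidos 0)).1

-- ===== PRECONDITION & SPEC =====
def Spec_subsecuencia_mas_larga (tipos_pacientes_atendidos : List String) (out : Int) : Prop := out = subsecuencia_mas_larga_alt tipos_pacientes_atendidos
instance (tipos_pacientes_atendidos : List String) (out : Int) : Decidable (Spec_subsecuencia_mas_larga tipos_pacientes_atendidos out) := by unfold Spec_subsecuencia_mas_larga; infer_instance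

-- ===== CLAIM (what is proved, stated in full; the proofs are below) =====
def Claim_equal_subsecuencia_mas_larga : Prop := ∀ (tipos_pacientes_atendidos : List String), Dom_subsecuencia_mas_larga tipos_pacientes_atendidos → Spec_subsecuencia_mas_larga tipos_pacientes_atendidos (subsecuencia_mas_larga tipos_pacientes_atendidos)

-- ===== LEMMAS AND PROOFS =====

-- incremental (one element at a time) run builder: proof intermediary between the ports
def pvCGo : List String → Int → Int → List (Int × Int)
  | [], idx, lcur => if 0 < lcur then [(idx - lcur, lcur)] else []
  | t :: ts, idx, lcur =>
    if pvQ t then pvCGo ts (idx + 1) (lcur + 1)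
    else if 0 < lcur then (idx - lcur, lcur) :: pvCGo ts (idx + 1) 0
    else pvCGo ts (idx + 1) 0

-- with a pending run of positive length lcur, pvCGo emits the merged run then restarts
theorem pvCGo_pending (xs : List String) : ∀ (idx lcur : Int), 0 < lcur →
    pvCGo xs idx lcur =
      (idx - lcur, lcur + ((xs.takeWhile pvQ).length : Int)) ::
        pvCGo (xs.drop (xs.takeWhile pvQ).length) (idx + ((xs.takeWhile pvQ).length : Int)) 0 := by
  induction xs with
  | nil => intro idx lcur h; simp [pvCGo, if_pos h]
  | cons t ts ih =>
    intro idx lcur h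
    by_cases hq : pvQ t
    · have := ih (idx + 1) (lcur + 1) (by omega)
      simp only [pvCGo, this, List.takeWhile_cons, hq, if_true, List.length_cons]
      push_cast
      congr 1
      · simp only [Prod.mk.injEq]; constructor <;> ring
      · congr 1; ring
    · simp only [pvCGo, if_pos h, List.takeWhile_cons, hq]
      simp [pvCGo, hq]

theorem pvRuns_eq_pvCGo : ∀ (n : ℕ) (xs : List String), xs.length ≤ n →
    ∀ i : Int, pvRuns xs i = pvCGo xs i 0 := by
  intro n
  induction n with
  | zero =>
    intro xs h i
    have : xs = [] := List.eq_nil_of_length_eq_zero (Nat.le_zero.mp h)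
    subst this; simp [pvRuns, pvCGo]
  | succ n ih =>
    intro xs h i
    match xs with
    | [] => simp [pvRuns, pvCGo]
    | t :: ts =>
      by_cases hq : pvQ t
      · have hlen : (ts.drop (ts.takeWhile pvQ).length).length ≤ n := by
          simp at h ⊢
          omega
        have hr : pvRuns (t :: ts) i =
            (i, (1 : Int) + ((ts.takeWhile pvQ).length : Int)) ::
              pvRuns (ts.drop (ts.takeWhile pvQ).length) (i + 1 + ((ts.takeWhile pvQ).length : Int)) := by
          rw [pvRuns]; simp [hq]
        have hc : pvCGo (t :: ts) i 0 = pvCGo ts (i + 1) 1 := by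
          simp [pvCGo, hq]
        rw [hr, hc, pvCGo_pending ts (i+1) 1 (by omega), ih _ hlen]
        have h1 : i + 1 - 1 = i := by ring
        rw [h1]
      · rw [pvRuns, if_neg hq]
        have hc : pvCGo (t :: ts) i 0 = pvCGo ts (i + 1) 0 := by
          simp [pvCGo, hq]
        rw [hc, ih ts (by simp at h; omega)]

-- A's fused scan equals: fold the best-step over the incrementally built runs
theorem pvAGo_eq_best : ∀ (xs : List String) (res lmax lcur idx : Int), 0 ≤ lmax →
    pvAGo xs res lmax lcur idx =
      ((pvCGo xs idx lcur).foldl (fun b r => if b.2 < r.2 then r else b) (res, lmax)).1 := by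
  intro xs
  induction xs with
  | nil =>
    intro res lmax lcur idx hm
    by_cases h : lmax < lcur
    · simp [pvAGo, pvCGo, if_pos h, if_pos (show (0:Int) < lcur by omega), List.foldl]
    · have h0 : ¬ (0:Int) < lcur ∨ ¬ lmax < lcur := by omega
      by_cases hp : (0:Int) < lcur
      · simp [pvAGo, pvCGo, if_neg h, if_pos hp, List.foldl]
      · simp [pvAGo, pvCGo, if_neg h, if_neg hp]
  | cons t ts ih =>
    intro res lmax lcur idx hm
    by_cases hq : pvQ t
    · have hq' : (t == "perro" || t == "gato") = true := hq
      rw [pvAGo, if_pos hq']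
      rw [ih res lmax (lcur+1) (idx+1) hm]
      simp [pvCGo, hq]
    · have hq' : ¬ (t == "perro" || t == "gato") = true := hq
      rw [pvAGo, if_neg hq']
      by_cases h : lmax < lcur
      · rw [if_pos h]
        rw [ih (idx - lcur) lcur 0 (idx+1) (by omega)]
        simp [pvCGo, hq, if_pos (show (0 : Int) < lcur by omega), if_pos h]
      · rw [if_neg h]
        rw [ih res lmax 0 (idx+1) hm]
        by_cases hp : (0:Int) < lcur
        · simp [pvCGo, hq, if_pos hp, if_neg h]
        · simp [pvCGo, hq, if_neg hp]

-- ===== VERDICT (by name: the statement is the Claim_ definition above) =====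
theorem subsecuencia_mas_larga_spec : Claim_equal_subsecuencia_mas_larga := by
  intro xs _
  show subsecuencia_mas_larga xs = subsecuencia_mas_larga_alt xs
  rw [subsecuencia_mas_larga, subsecuencia_mas_larga_alt, pvBest,
    pvRuns_eq_pvCGo xs.length xs le_rfl 0, pvAGo_eq_best xs 0 0 0 0 le_rfl]
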